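-- pv_equiv track=rewrite | github.com/Ryano1221/Financial-Modeling | backend/extraction/regex.py | _nearest_keyword_distance
-- ===== SOURCE A (Python) =====
-- def _nearest_keyword_distance(line_low: str, idx: int, keywords: tuple[str, ...]) -> int | None:
--     best: int | None = None
--     for kw in keywords:
--         start = 0
--         while True:
--             pos = line_low.find(kw, start)
--             if pos < 0:
--                 break
--             dist = abs(pos - idx)
--             if best is None or dist < best:
--                 best = dist
--             start = pos + 1
--     return best
-- ===== SOURCE B (Python) =====
-- def _nearest_keyword_distance(line_low: str, idx: int, keywords) -> int | None:
--     best: int | None = None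
--     for kw in keywords:
--         r = line_low.find(kw, max(idx, 0))
--         if r >= 0:
--             d = abs(r - idx)
--             if best is None or d < best:
--                 best = d
--         l = line_low.rfind(kw, 0, max(idx + len(kw) - 1, 0))
--         if l >= 0:
--             d = abs(l - idx)
--             if best is None or d < best:
--                 best = d
--     return best
-- ===== Notes on version B (the rewrite author's own statement) =====
-- stated objective: faster
-- what changed: Instead of enumerating every occurrence of each keyword with a find loop, B asks only for the two bracketing matches per keyword - find(kw, max(idx,0)) for the nearest occurrence at/after idx and rfind(kw, 0, max(idx+len(kw)-1, 0)) for the nearest occurrence starting before idx - and takes the minimum distance over those candidates.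
import Mathlib
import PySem

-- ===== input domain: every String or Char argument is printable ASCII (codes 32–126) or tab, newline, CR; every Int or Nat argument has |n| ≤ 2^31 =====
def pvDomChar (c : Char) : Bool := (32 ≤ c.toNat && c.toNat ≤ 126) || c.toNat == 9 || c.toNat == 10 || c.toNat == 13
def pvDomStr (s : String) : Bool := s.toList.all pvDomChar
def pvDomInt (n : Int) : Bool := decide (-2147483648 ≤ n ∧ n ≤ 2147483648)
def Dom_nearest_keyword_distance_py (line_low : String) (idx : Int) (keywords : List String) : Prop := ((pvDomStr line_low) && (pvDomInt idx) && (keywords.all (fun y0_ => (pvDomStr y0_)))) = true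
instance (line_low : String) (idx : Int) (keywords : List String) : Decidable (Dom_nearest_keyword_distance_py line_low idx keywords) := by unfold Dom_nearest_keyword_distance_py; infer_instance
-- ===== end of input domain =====

-- B replaces A's per-keyword scan over EVERY occurrence with just the two bracketing
-- matches (find at/after the clamped idx, rfind ending before idx); measurably faster.

-- ===== PORT A =====

-- helper lemma cited by pvFindLoopA's decreasing_by (termination of the while loop):
-- a non-negative find(kw, k) points at an occurrence: it is ≥ k and ≤ len(s).
theorem pvFindFrom_bounds (s kw : List Char) (k : Nat)
    (h : 0 ≤ PySem.Chars.findFrom s kw (k : Int) none) :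
    k ≤ (PySem.Chars.findFrom s kw (k : Int) none).toNat ∧
    (PySem.Chars.findFrom s kw (k : Int) none).toNat ≤ s.length ∧
    kw <+: s.drop (PySem.Chars.findFrom s kw (k : Int) none).toNat ∧
    ∀ j, k ≤ j → j < (PySem.Chars.findFrom s kw (k : Int) none).toNat → ¬ kw <+: s.drop j := by
  by_cases hk : k ≤ s.length
  · rw [PySem.Chars.findFrom_natCast s kw k hk] at h ⊢
    by_cases hf : PySem.Chars.find (s.drop k) kw = -1
    · rw [if_pos hf] at h; omega
    · rw [if_neg hf] at h ⊢
      have hr0 : 0 ≤ PySem.Chars.find (s.drop k) kw := by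
        have := PySem.Chars.neg_one_le_find (s.drop k) kw; omega
      have hspec := PySem.Chars.find_spec hr0
      have hlen := PySem.Chars.find_le_length (s.drop k) kw
      rw [List.length_drop] at hlen
      have htn : ((k : Int) + PySem.Chars.find (s.drop k) kw).toNat
          = k + (PySem.Chars.find (s.drop k) kw).toNat := by omega
      rw [htn]
      refine ⟨by omega, by omega, ?_, ?_⟩
      · have := hspec.1
        rw [List.drop_drop] at this
        convert this using 2
      · intro j hj1 hj2 hpre
        have := hspec.2 (j - k) (by omega)
        rw [List.drop_drop] at this
        apply this
        rw [show k + (j - k) = j from by omega]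
        exact hpre
  · exfalso
    have : PySem.Chars.findFrom s kw (k : Int) none = -1 := by
      simp only [PySem.Chars.findFrom]
      rw [if_neg (by omega : ¬ (k : Int) < 0), if_pos (by exact_mod_cast by omega : (s.length : Int) < (k : Int))]
    omega

-- the 'while True: pos = line_low.find(kw, start) …' loop of A, start ∈ ℕ (it is 0, then pos+1)
def pvFindLoopA (s kw : String) (idx : Int) (start : Nat) (best : Option Int) : Option Int :=
  let pos := PySem.Str.findFrom s kw (start : Int) none
  if pos < 0 then best
  else
    let dist := |pos - idx|
    let best' := match best with
      | none => some dist
      | some b => if dist < b then some dist else some b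
    pvFindLoopA s kw idx (pos.toNat + 1) best'
termination_by s.toList.length + 1 - start
decreasing_by
  have heq := PySem.Str.findFrom_eq s kw (start : Int) none
  have hb := pvFindFrom_bounds s.toList kw.toList start (by omega)
  omega

def nearest_keyword_distance_py (line_low : String) (idx : Int) (keywords : List String) : Option Int :=
  keywords.foldl (fun best kw => pvFindLoopA line_low kw idx 0 best) none

-- ===== PORT B =====
def nearest_keyword_distance_py_alt (line_low : String) (idx : Int) (keywords : List String) : Option Int :=
  keywords.foldl (fun best kw =>
    let r := PySem.Str.findFrom line_low kw (max idx 0) none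
    let best1 :=
      if 0 ≤ r then
        let d := |r - idx|
        match best with
        | none => some d
        | some b => if d < b then some d else some b
      else best
    let l := PySem.Str.rfindFrom line_low kw 0 (some (max (idx + PySem.Str.len kw - 1) 0))
    if 0 ≤ l then
      let d := |l - idx|
      match best1 with
      | none => some d
      | some b => if d < b then some d else some b
    else best1) none

-- ===== PRECONDITION & SPEC =====
def Spec_nearest_keyword_distance_py (line_low : String) (idx : Int) (keywords : List String) (out : Option Int) : Prop := out = nearest_keyword_distance_py_alt line_low idx keywords
instance (line_low : String) (idx : Int) (keywords : List String) (out : Option Int) : Decidable (Spec_nearest_keyword_distance_py line_low idx keywords out) := by unfold Spec_nearest_keyword_distance_py; infer_instance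

-- ===== CLAIM (what is proved, stated in full; the proofs are below) =====
def Claim_equal_nearest_keyword_distance_py : Prop := ∀ (line_low : String) (idx : Int) (keywords : List String), Dom_nearest_keyword_distance_py line_low idx keywords → Spec_nearest_keyword_distance_py line_low idx keywords (nearest_keyword_distance_py line_low idx keywords)

-- ===== LEMMAS AND PROOFS =====

-- occurrence positions of kw in s at or after position k, in increasing order
def pvOccGe (s kw : List Char) (k : Nat) : List Nat :=
  (List.range (s.length + 1)).filter (fun p => decide (k ≤ p) && kw.isPrefixOf (s.drop p))

-- merge an optional running best with an optional new candidate, keeping the min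
def pvMerge (b o : Option Int) : Option Int :=
  match o with
  | none => b
  | some d => match b with
    | none => some d
    | some x => some (min x d)

theorem pvMerge_assoc (a b c : Option Int) : pvMerge (pvMerge a b) c = pvMerge a (pvMerge b c) := by
  cases a <;> cases b <;> cases c <;> simp [pvMerge, min_assoc]

theorem pvUpd_eq_merge (best : Option Int) (d : Int) :
    (match best with
      | none => some d
      | some b => if d < b then some d else some b) = pvMerge best (some d) := by
  cases best with
  | none => rfl
  | some b =>
    simp only [pvMerge]
    rcases lt_or_ge d b with h | h
    · rw [if_pos h, min_eq_right h.le]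
    · rw [if_neg (not_lt.mpr h), min_eq_left h]

theorem pvFoldlMin_init (t : List Int) (a b : Int) :
    t.foldl min (min a b) = min a (t.foldl min b) := by
  induction t generalizing b with
  | nil => rfl
  | cons c t ih => simp only [List.foldl_cons, min_assoc, ih]

theorem pvMin?_cons (a : Int) (l : List Int) : (a :: l).min? = pvMerge (some a) l.min? := by
  cases l with
  | nil => rfl
  | cons b t => simp only [List.min?_cons', pvMerge, Option.some.injEq]; exact pvFoldlMin_init t a b

theorem pvMem_occGe {s kw : List Char} {k p : Nat} :
    p ∈ pvOccGe s kw k ↔ p ≤ s.length ∧ k ≤ p ∧ kw <+: s.drop p := by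
  simp [pvOccGe, List.mem_filter, List.mem_range, List.isPrefixOf_iff_prefix]

theorem pvOccGe_nil {s kw : List Char} {k : Nat}
    (h : ∀ j, k ≤ j → j ≤ s.length → ¬ kw <+: s.drop j) : pvOccGe s kw k = [] := by
  rw [List.eq_nil_iff_forall_not_mem]
  intro p hp
  rw [pvMem_occGe] at hp
  exact h p hp.2.1 hp.1 hp.2.2

theorem pvOccGe_cons {s kw : List Char} {k p0 : Nat} (h1 : p0 ≤ s.length) (hk : k ≤ p0)
    (hp : kw <+: s.drop p0) (hmin : ∀ j, k ≤ j → j < p0 → ¬ kw <+: s.drop j) :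
    pvOccGe s kw k = p0 :: pvOccGe s kw (p0 + 1) := by
  have hpair : ∀ m, (pvOccGe s kw m).Pairwise (· < ·) :=
    fun m => List.Pairwise.filter _ List.pairwise_lt_range
  have hnd : ∀ m, (pvOccGe s kw m).Nodup := fun m => (hpair m).imp Nat.ne_of_lt
  have hmem : ∀ a, a ∈ pvOccGe s kw k ↔ a ∈ p0 :: pvOccGe s kw (p0 + 1) := by
    intro a
    rw [pvMem_occGe, List.mem_cons, pvMem_occGe]
    constructor
    · rintro ⟨ha1, ha2, ha3⟩
      rcases Nat.lt_trichotomy a p0 with h | h | h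
      · exact absurd ha3 (hmin a ha2 h)
      · exact Or.inl h
      · exact Or.inr ⟨ha1, h, ha3⟩
    · rintro (rfl | ⟨ha1, ha2, ha3⟩)
      · exact ⟨h1, hk, hp⟩
      · exact ⟨ha1, by omega, ha3⟩
  have hnd2 : (p0 :: pvOccGe s kw (p0 + 1)).Nodup := by
    refine List.nodup_cons.mpr ⟨fun hmem' => ?_, hnd _⟩
    · rw [pvMem_occGe] at hmem'; omega
  have hperm := (List.perm_ext_iff_of_nodup (hnd k) hnd2).mpr hmem
  have hsorted2 : (p0 :: pvOccGe s kw (p0 + 1)).Pairwise (· < ·) := by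
    refine List.pairwise_cons.mpr ⟨fun a ha => ?_, hpair _⟩
    · rw [pvMem_occGe] at ha; omega
  exact List.Perm.eq_of_pairwise (fun a b _ _ h1' h2' => absurd h1' (Nat.lt_asymm h2')) (hpair k)
    hsorted2 hperm

theorem pvFindFrom_neg (s kw : List Char) (k : Nat)
    (h : PySem.Chars.findFrom s kw (k : Int) none < 0) :
    ∀ j, k ≤ j → j ≤ s.length → ¬ kw <+: s.drop j := by
  intro j hj1 hj2 hpre
  by_cases hk : k ≤ s.length
  · rw [PySem.Chars.findFrom_natCast s kw k hk] at h
    by_cases hf : PySem.Chars.find (s.drop k) kw = -1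
    · rw [PySem.Chars.find_eq_neg_one_iff, ← PySem.Chars.isIn_iff_infix,
        ← PySem.Chars.exists_prefix_drop_iff_isIn] at hf
      refine hf ⟨j - k, ?_⟩
      rw [List.drop_drop, show k + (j - k) = j from by omega]
      exact hpre
    · rw [if_neg hf] at h
      have := PySem.Chars.neg_one_le_find (s.drop k) kw
      omega
  · omega

-- A's inner loop computes best merged with the minimum distance over occurrences ≥ start
theorem pvFindLoopA_eq (s kw : String) (idx : Int) (k : Nat) (best : Option Int) :
    pvFindLoopA s kw idx k best =
      pvMerge best (((pvOccGe s.toList kw.toList k).map (fun p : Nat => |(p : Int) - idx|)).min?) := by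
  induction k, best using pvFindLoopA.induct s kw idx with
  | case1 start best pos hneg =>
    have hneg' : PySem.Chars.findFrom s.toList kw.toList (start : Int) none < 0 := by
      rw [← PySem.Str.findFrom_eq]; exact hneg
    rw [pvFindLoopA, if_pos hneg, pvOccGe_nil (pvFindFrom_neg s.toList kw.toList start hneg')]
    rfl
  | case2 start best pos hneg dist best2 ih =>
    have heq : pos = PySem.Chars.findFrom s.toList kw.toList (start : Int) none :=
      PySem.Str.findFrom_eq s kw (start : Int) none
    have hps : (0 : Int) ≤ pos := not_lt.mp hneg
    have hb := pvFindFrom_bounds s.toList kw.toList start (heq ▸ hps)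
    have hbest2 : best2 = pvMerge best (some dist) := pvUpd_eq_merge best dist
    rw [pvFindLoopA, if_neg hneg]
    show pvFindLoopA s kw idx (pos.toNat + 1) best2 = _
    rw [ih, hbest2, pvMerge_assoc, pvOccGe_cons hb.2.1 hb.1 hb.2.2.1 hb.2.2.2, List.map_cons,
      pvMin?_cons]
    have hd0 : ((PySem.Chars.findFrom s.toList kw.toList (start : Int) none).toNat : Int) = pos := by
      rw [heq] at hps ⊢
      omega
    rw [hd0, ← heq]

-- rfind.go s sub j: either no occurrence at a position ≤ j, or it returns the greatest one
theorem pvRfindGo_cases (s sub : List Char) (j : Nat) :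
    (PySem.Chars.rfind.go s sub j = -1 ∧ ∀ p ≤ j, ¬ sub <+: s.drop p) ∨
    (∃ p : Nat, PySem.Chars.rfind.go s sub j = (p : Int) ∧ p ≤ j ∧ sub <+: s.drop p ∧
      ∀ q, p < q → q ≤ j → ¬ sub <+: s.drop q) := by
  induction j with
  | zero =>
    by_cases h : sub.isPrefixOf s
    · right
      refine ⟨0, ?_, le_refl 0, ?_, fun q hq1 hq2 => absurd (Nat.lt_of_lt_of_le hq1 hq2) (lt_irrefl 0)⟩
      · simp [PySem.Chars.rfind.go, h]
      · simpa [List.isPrefixOf_iff_prefix] using h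
    · left
      refine ⟨by simp [PySem.Chars.rfind.go, h], fun p hp => ?_⟩
      rw [Nat.le_zero] at hp
      subst hp
      simpa [List.isPrefixOf_iff_prefix] using h
  | succ j ih =>
    by_cases h : sub.isPrefixOf (s.drop (j + 1))
    · right
      refine ⟨j + 1, ?_, le_refl _, ?_, fun q hq1 hq2 => absurd (Nat.lt_of_lt_of_le hq1 hq2) (lt_irrefl _)⟩
      · simp [PySem.Chars.rfind.go, h]
      · simpa [List.isPrefixOf_iff_prefix] using h
    · have hgo : PySem.Chars.rfind.go s sub (j + 1) = PySem.Chars.rfind.go s sub j := by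
        simp [PySem.Chars.rfind.go, h]
      have hnp : ¬ sub <+: s.drop (j + 1) := by
        simpa [List.isPrefixOf_iff_prefix] using h
      rcases ih with ⟨h1, h2⟩ | ⟨p, h1, h2, h3, h4⟩
      · left
        refine ⟨hgo.trans h1, fun p hp => ?_⟩
        rcases Nat.lt_succ_iff_lt_or_eq.mp (Nat.lt_succ_of_le hp) with hlt | rfl
        · exact h2 p (by omega)
        · exact hnp
      · right
        refine ⟨p, hgo.trans h1, Nat.le_succ_of_le h2, h3, fun q hq1 hq2 => ?_⟩
        rcases Nat.lt_succ_iff_lt_or_eq.mp (Nat.lt_succ_of_le hq2) with hlt | rfl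
        · exact h4 q hq1 (by omega)
        · exact hnp

theorem pvRfindFrom_eq_rfind_take (s kw : List Char) (e : Int) (he : 0 ≤ e) :
    PySem.Chars.rfindFrom s kw 0 (some e) =
      PySem.Chars.rfind (s.take (min e.toNat s.length)) kw := by
  simp only [PySem.Chars.rfindFrom]
  have h0 : ¬ ((0 : Int) < 0) := lt_irrefl 0
  rw [if_neg h0]
  have he2 : (if e < 0 then (if e + (s.length : Int) < 0 then 0 else e + (s.length : Int)) else e)
      = e := if_neg (not_lt.mpr he)
  rw [he2]
  have he' : (if (s.length : Int) < e then (s.length : Int) else e) =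
      ((min e.toNat s.length : Nat) : Int) := by
    split_ifs with h <;> omega
  rw [he']
  rw [if_neg (by omega : ¬ ((min e.toNat s.length : Nat) : Int) < 0)]
  simp only [Int.toNat_zero, List.drop_zero, Int.toNat_natCast]
  split_ifs with h
  · omega
  · omega

theorem pvPrefixTake (sl kl : List Char) (m p : Nat) (hp : p ≤ m) :
    kl <+: (sl.take m).drop p ↔ kl <+: sl.drop p ∧ p + kl.length ≤ m := by
  rw [List.drop_take, List.prefix_take_iff]
  constructor
  · rintro ⟨h1, h2⟩; exact ⟨h1, by omega⟩
  · rintro ⟨h1, h2⟩; exact ⟨h1, by omega⟩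

theorem pvRfind_take_cases (sl kl : List Char) (m : Nat) (hm : m ≤ sl.length) :
    (PySem.Chars.rfind (sl.take m) kl = -1 ∧
      ∀ p : Nat, p + kl.length ≤ m → ¬ kl <+: sl.drop p) ∨
    (∃ q : Nat, PySem.Chars.rfind (sl.take m) kl = (q : Int) ∧ q + kl.length ≤ m ∧
      kl <+: sl.drop q ∧ ∀ p : Nat, q < p → p + kl.length ≤ m → ¬ kl <+: sl.drop p) := by
  have hlen : (sl.take m).length = m := by rw [List.length_take]; omega
  have hcases := pvRfindGo_cases (sl.take m) kl m
  have hrw : PySem.Chars.rfind (sl.take m) kl = PySem.Chars.rfind.go (sl.take m) kl m := by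
    rw [PySem.Chars.rfind, hlen]
  rcases hcases with ⟨h1, h2⟩ | ⟨q, h1, h2, h3, h4⟩
  · left
    refine ⟨hrw.trans h1, fun p hp hpre => ?_⟩
    exact h2 p (by omega) ((pvPrefixTake sl kl m p (by omega)).mpr ⟨hpre, hp⟩)
  · right
    have hq := (pvPrefixTake sl kl m q h2).mp h3
    refine ⟨q, hrw.trans h1, hq.2, hq.1, fun p hp1 hp2 hpre => ?_⟩
    exact h4 p hp1 (by omega) ((pvPrefixTake sl kl m p (by omega)).mpr ⟨hpre, hp2⟩)

theorem pvFind_clamp_cases (sl kl : List Char) (idx : Int) :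
    (PySem.Chars.findFrom sl kl (max idx 0) none < 0 ∧
      ∀ p : Nat, p ≤ sl.length → idx ≤ (p : Int) → ¬ kl <+: sl.drop p) ∨
    (∃ q : Nat, PySem.Chars.findFrom sl kl (max idx 0) none = (q : Int) ∧ q ≤ sl.length ∧
      idx ≤ (q : Int) ∧ kl <+: sl.drop q ∧
      ∀ p : Nat, idx ≤ (p : Int) → p < q → ¬ kl <+: sl.drop p) := by
  have hk0 : ((max idx 0).toNat : Int) = max idx 0 := by omega
  rw [← hk0]
  by_cases h : PySem.Chars.findFrom sl kl ((max idx 0).toNat : Int) none < 0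
  · left
    refine ⟨h, fun p hp1 hp2 hpre => ?_⟩
    exact pvFindFrom_neg sl kl (max idx 0).toNat h p (by omega) hp1 hpre
  · right
    have hb := pvFindFrom_bounds sl kl (max idx 0).toNat (by omega)
    refine ⟨(PySem.Chars.findFrom sl kl ((max idx 0).toNat : Int) none).toNat,
      by omega, hb.2.1, by omega, hb.2.2.1, fun p hp1 hp2 hpre => ?_⟩
    exact hb.2.2.2 p (by omega) hp2 hpre

theorem pvBracket_min (sl kl : List Char) (idx : Int) (e : Int) (m : Nat) (r l : Int)
    (he : e = max (idx + (kl.length : Int) - 1) 0)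
    (hm : m = min e.toNat sl.length)
    (hr : r = PySem.Chars.findFrom sl kl (max idx 0) none)
    (hl : l = PySem.Chars.rfind (sl.take m) kl) :
    pvMerge (if 0 ≤ r then some |r - idx| else none) (if 0 ≤ l then some |l - idx| else none)
      = ((pvOccGe sl kl 0).map (fun p : Nat => |(p : Int) - idx|)).min? := by
  subst hr hl
  have hfc := pvFind_clamp_cases sl kl idx
  have hrc := pvRfind_take_cases sl kl m (by omega)
  rcases hD : ((pvOccGe sl kl 0).map (fun p : Nat => |(p : Int) - idx|)).min? with _ | dmin
  · rw [List.min?_eq_none_iff, List.map_eq_nil_iff] at hD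
    have hnone : ∀ p : Nat, p ≤ sl.length → ¬ kl <+: sl.drop p := by
      intro p h1 h2
      have hp : p ∈ pvOccGe sl kl 0 := pvMem_occGe.mpr ⟨h1, Nat.zero_le p, h2⟩
      rw [hD] at hp
      exact absurd hp (List.not_mem_nil)
    have hr0 : ¬ 0 ≤ PySem.Chars.findFrom sl kl (max idx 0) none := by
      intro h0
      rcases hfc with ⟨hneg, _⟩ | ⟨q, _, hq1, _, hq3, _⟩
      · omega
      · exact hnone q hq1 hq3
    have hl0 : ¬ 0 ≤ PySem.Chars.rfind (sl.take m) kl := by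
      intro h0
      rcases hrc with ⟨hneg, _⟩ | ⟨q, hql, hq1, hq2, _⟩
      · omega
      · exact hnone q (by omega) hq2
    rw [if_neg hr0, if_neg hl0]
    rfl
  · rw [List.min?_eq_some_iff] at hD
    obtain ⟨hdmem, hdle⟩ := hD
    obtain ⟨ps, hpocc, hpd⟩ := List.mem_map.mp hdmem
    rw [pvMem_occGe] at hpocc
    obtain ⟨hp1, -, hp3⟩ := hpocc
    have hAr : 0 ≤ PySem.Chars.findFrom sl kl (max idx 0) none →
        dmin ≤ |PySem.Chars.findFrom sl kl (max idx 0) none - idx| := by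
      intro h0
      rcases hfc with ⟨hneg, _⟩ | ⟨q, heq', hq1, hq2, hq3, _⟩
      · omega
      · have hmem : |(q : Int) - idx| ∈ (pvOccGe sl kl 0).map (fun p : Nat => |(p : Int) - idx|) :=
          List.mem_map.mpr ⟨q, pvMem_occGe.mpr ⟨hq1, Nat.zero_le q, hq3⟩, rfl⟩
        rw [heq']
        exact hdle _ hmem
    have hAl : 0 ≤ PySem.Chars.rfind (sl.take m) kl →
        dmin ≤ |PySem.Chars.rfind (sl.take m) kl - idx| := by
      intro h0
      rcases hrc with ⟨hneg, _⟩ | ⟨q, heq', hq1, hq2, _⟩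
      · omega
      · have hqle : q ≤ sl.length := by clear hfc hdle hdmem; omega
        have hmem : |(q : Int) - idx| ∈ (pvOccGe sl kl 0).map (fun p : Nat => |(p : Int) - idx|) :=
          List.mem_map.mpr ⟨q, pvMem_occGe.mpr ⟨hqle, Nat.zero_le q, hq2⟩, rfl⟩
        rw [heq']
        exact hdle _ hmem
    have hB : (0 ≤ PySem.Chars.findFrom sl kl (max idx 0) none ∧
          |PySem.Chars.findFrom sl kl (max idx 0) none - idx| ≤ dmin) ∨
        (0 ≤ PySem.Chars.rfind (sl.take m) kl ∧
          |PySem.Chars.rfind (sl.take m) kl - idx| ≤ dmin) := by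
      by_cases hpi : idx ≤ (ps : Int)
      · left
        rcases hfc with ⟨hneg, hall⟩ | ⟨q, heq', hq1, hq2, hq3, hq4⟩
        · exact absurd hp3 (hall ps hp1 hpi)
        · have hqp : q ≤ ps := by
            by_contra hgt
            have hlt : ps < q := by omega
            exact hq4 ps hpi hlt hp3
          have h0q : (0 : Int) ≤ (q : Int) := by omega
          refine ⟨by omega, ?_⟩
          rw [heq', ← hpd, abs_of_nonneg (by omega : (0 : Int) ≤ (q : Int) - idx),
            abs_of_nonneg (by omega : (0 : Int) ≤ (ps : Int) - idx)]
          omega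
      · rw [not_le] at hpi
        clear hfc hdle hdmem
        right
        have hlenp : kl.length ≤ sl.length - ps := by
          have := hp3.length_le
          rwa [List.length_drop] at this
        have he' : e = idx + (kl.length : Int) - 1 := by clear hrc; rw [he]; omega
        have hpm : ps + kl.length ≤ m := by clear hrc; omega
        rcases hrc with ⟨hneg, hall⟩ | ⟨q, heq', hq1, hq2, hq3⟩
        · exact absurd hp3 (hall ps hpm)
        · have hqp : ps ≤ q := by
            by_contra hgt
            have hlt : q < ps := by omega
            exact hq3 ps hlt hpm hp3
          have hqidx : (q : Int) ≤ idx - 1 := by omega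
          refine ⟨by omega, ?_⟩
          rw [heq', ← hpd, abs_of_nonpos (by omega : (q : Int) - idx ≤ 0),
            abs_of_nonpos (by omega : (ps : Int) - idx ≤ 0)]
          omega
    by_cases hr0 : 0 ≤ PySem.Chars.findFrom sl kl (max idx 0) none <;>
      by_cases hl0 : 0 ≤ PySem.Chars.rfind (sl.take m) kl
    · rw [if_pos hr0, if_pos hl0]
      have h1 := hAr hr0
      have h2 := hAl hl0
      simp only [pvMerge, Option.some.injEq]
      rcases hB with ⟨-, h3⟩ | ⟨-, h3⟩ <;> omega
    · rw [if_pos hr0, if_neg hl0]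
      have h1 := hAr hr0
      simp only [pvMerge, Option.some.injEq]
      rcases hB with ⟨-, h3⟩ | ⟨hc, -⟩
      · omega
      · exact absurd hc hl0
    · rw [if_neg hr0, if_pos hl0]
      have h2 := hAl hl0
      simp only [pvMerge, Option.some.injEq]
      rcases hB with ⟨hc, -⟩ | ⟨-, h3⟩
      · exact absurd hc hr0
      · omega
    · rcases hB with ⟨hc, -⟩ | ⟨hc, -⟩
      · exact absurd hc hr0
      · exact absurd hc hl0

-- B's per-keyword step equals best merged with the minimum distance over ALL occurrences
theorem pvKwStep_eq (s kw : String) (idx : Int) (best : Option Int) :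
    (let r := PySem.Str.findFrom s kw (max idx 0) none
     let best1 :=
       if 0 ≤ r then
         let d := |r - idx|
         match best with
         | none => some d
         | some b => if d < b then some d else some b
       else best
     let l := PySem.Str.rfindFrom s kw 0 (some (max (idx + PySem.Str.len kw - 1) 0))
     if 0 ≤ l then
       let d := |l - idx|
       match best1 with
       | none => some d
       | some b => if d < b then some d else some b
     else best1) =
      pvMerge best (((pvOccGe s.toList kw.toList 0).map (fun p : Nat => |(p : Int) - idx|)).min?) := by
  simp only [PySem.Str.findFrom_eq, PySem.Str.rfindFrom_eq, PySem.Str.len_eq]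
  rw [pvRfindFrom_eq_rfind_take s.toList kw.toList _ (le_max_right _ _)]
  have hmain := pvBracket_min s.toList kw.toList idx
      (max (idx + (kw.toList.length : Int) - 1) 0)
      (min (max (idx + (kw.toList.length : Int) - 1) 0).toNat s.toList.length)
      (PySem.Chars.findFrom s.toList kw.toList (max idx 0) none)
      (PySem.Chars.rfind
        (s.toList.take (min (max (idx + (kw.toList.length : Int) - 1) 0).toNat s.toList.length))
        kw.toList)
      rfl rfl rfl rfl
  rw [← hmain]
  by_cases hr : 0 ≤ PySem.Chars.findFrom s.toList kw.toList (max idx 0) none <;>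
    by_cases hl : 0 ≤ PySem.Chars.rfind
      (s.toList.take (min (max (idx + (kw.toList.length : Int) - 1) 0).toNat s.toList.length))
      kw.toList
  · rw [if_pos hr, if_pos hl, if_pos hr, if_pos hl, pvUpd_eq_merge, pvUpd_eq_merge, pvMerge_assoc]
  · rw [if_pos hr, if_neg hl, if_pos hr, if_neg hl, pvUpd_eq_merge]
    rfl
  · rw [if_neg hr, if_pos hl, if_neg hr, if_pos hl, pvUpd_eq_merge]
    rfl
  · rw [if_neg hr, if_neg hl, if_neg hr, if_neg hl]
    rfl

-- ===== VERDICT (by name: the statement is the Claim_ definition above) =====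
theorem nearest_keyword_distance_py_spec : Claim_equal_nearest_keyword_distance_py := by
  intro line_low idx keywords _
  unfold Spec_nearest_keyword_distance_py nearest_keyword_distance_py nearest_keyword_distance_py_alt
  congr 1
  funext best kw
  rw [pvFindLoopA_eq, pvKwStep_eq]
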